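-- pv_equiv track=rewrite | github.com/oclyke/covered-eyes | src/semver.py | compare_meta
-- ===== SOURCE A (Python) =====
-- def compare_meta(set_a, set_b):
--     # if both sets are empty at the same time they are equal
--     if (not len(set_a)) and (not len(set_b)):
--         return 0
--
--     # we know at least one set has items remaining
--     # if one set empties first it has lower precedence
--     if (not len(set_a)) or (not len(set_b)):
--         return 1 if not len(set_b) else -1
--
--     # both sets have items to compare at this level
--     a = set_a.pop(0)
--     b = set_b.pop(0)
--
--     try:
--         if int(a) == int(b):
--             return compare_meta(set_a, set_b)
--         return 1 if int(a) > int(b) else -1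
--     except ValueError:
--         if str(a) == str(b):
--             return compare_meta(set_a, set_b)
--         return 1 if str(a) > str(b) else -1
-- ===== SOURCE B (Python) =====
-- def _cmp_identifier(a, b):
--     try:
--         x, y = int(a), int(b)
--     except ValueError:
--         x, y = str(a), str(b)
--     return (x > y) - (x < y)
--
-- def compare_meta(set_a, set_b):
--     while len(set_a) and len(set_b):
--         c = _cmp_identifier(set_a.pop(0), set_b.pop(0))
--         if c:
--             return c
--     if not set_a and not set_b:
--         return 0
--     return 1 if not set_b else -1
-- ===== Notes on version B (the rewrite author's own statement) =====
-- stated objective: simpler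
-- what changed: Replaces the recursion with an iterative while loop over a three-valued sign helper ((x>y)-(x<y)) that unifies the int and string comparison branches, leaving the tail precedence check to one final step.
import Mathlib
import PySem

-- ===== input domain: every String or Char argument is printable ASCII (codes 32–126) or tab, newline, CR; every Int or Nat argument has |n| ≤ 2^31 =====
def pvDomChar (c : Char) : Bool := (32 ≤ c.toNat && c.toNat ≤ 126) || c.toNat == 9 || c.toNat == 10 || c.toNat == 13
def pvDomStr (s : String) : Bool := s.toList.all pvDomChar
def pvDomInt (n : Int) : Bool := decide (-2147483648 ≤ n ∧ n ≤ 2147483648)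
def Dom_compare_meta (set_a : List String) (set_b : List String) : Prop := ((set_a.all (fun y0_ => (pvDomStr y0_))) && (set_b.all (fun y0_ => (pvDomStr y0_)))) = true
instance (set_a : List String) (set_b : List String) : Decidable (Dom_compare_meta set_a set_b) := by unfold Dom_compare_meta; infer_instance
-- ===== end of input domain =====

-- B replaces A's recursion by an iterative loop over a three-valued sign helper (simpler decomposition,
-- same cost). Both A and B consume their list arguments with pop(0); the equivalence proved here is about
-- the RETURN value only.


-- ===== PORT A =====
-- Recursive, as in A: empty checks first, then pop the heads, try int(a)/int(b)
-- (PySem.Int.ofStr? = Python int(s); a `none` is the ValueError caught by A's except),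
-- string fallback; String '<' is Python's str comparison (PYSEM.md).
def compare_meta (set_a : List String) (set_b : List String) : Int :=
  match set_a, set_b with
  | [], [] => 0
  | _ :: _, [] => 1
  | [], _ :: _ => -1
  | a :: rest_a, b :: rest_b =>
    match PySem.Int.ofStr? a, PySem.Int.ofStr? b with
    | some ia, some ib =>
      if ia = ib then compare_meta rest_a rest_b
      else if ia > ib then 1 else -1
    | _, _ =>
      if a = b then compare_meta rest_a rest_b
      else if b < a then 1 else -1

-- ===== PORT B =====
-- _cmp_identifier: (x > y) - (x < y) after trying int on both, string fallback.
-- the try block binds the pair (int(a), int(b)) at once; any ValueError falls to the string pair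
def cmpIdentifier (a : String) (b : String) : Int :=
  match (PySem.Int.ofStr? a).bind (fun x => (PySem.Int.ofStr? b).map (fun y => (x, y))) with
  | some (x, y) => (if x > y then (1:Int) else 0) - (if x < y then 1 else 0)
  | none => (if a > b then (1:Int) else 0) - (if a < b then 1 else 0)

-- the while loop: pop both fronts while both nonempty; fall-through precedence at the end.
def cmpLoop (set_a : List String) (set_b : List String) : Int :=
  match set_a, set_b with
  | a :: rest_a, b :: rest_b =>
    let c := cmpIdentifier a b
    if c ≠ 0 then c else cmpLoop rest_a rest_b
  | sa, sb =>
    if sa = [] ∧ sb = [] then 0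
    else if sb = [] then 1 else -1

def compare_meta_alt (set_a : List String) (set_b : List String) : Int :=
  cmpLoop set_a set_b

-- ===== PRECONDITION & SPEC =====
def Spec_compare_meta (set_a : List String) (set_b : List String) (out : Int) : Prop := out = compare_meta_alt set_a set_b
instance (set_a : List String) (set_b : List String) (out : Int) : Decidable (Spec_compare_meta set_a set_b out) := by unfold Spec_compare_meta; infer_instance

-- ===== CLAIM (what is proved, stated in full; the proofs are below) =====
def Claim_equal_compare_meta : Prop := ∀ (set_a : List String) (set_b : List String), Dom_compare_meta set_a set_b → Spec_compare_meta set_a set_b (compare_meta set_a set_b)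

-- ===== LEMMAS AND PROOFS =====

theorem compare_meta_eq_loop : ∀ (set_a set_b : List String),
    compare_meta set_a set_b = cmpLoop set_a set_b
  | [], [] => by simp [compare_meta, cmpLoop]
  | _ :: _, [] => by simp [compare_meta, cmpLoop]
  | [], _ :: _ => by simp [compare_meta, cmpLoop]
  | a :: ra, b :: rb => by
    rw [compare_meta, cmpLoop]
    simp only [cmpIdentifier]
    cases ha : PySem.Int.ofStr? a <;> cases hb : PySem.Int.ofStr? b
    · -- both ValueError: string comparison
      rcases lt_trichotomy a b with h | h | h
      · simp [h, ne_of_lt h, not_lt_of_gt h]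
      · simp [h, compare_meta_eq_loop ra rb]
      · simp [ne_of_gt h, h, not_lt_of_gt h]
    · rcases lt_trichotomy a b with h | h | h
      · simp [h, ne_of_lt h, not_lt_of_gt h]
      · simp [h, compare_meta_eq_loop ra rb]
      · simp [ne_of_gt h, h, not_lt_of_gt h]
    · rcases lt_trichotomy a b with h | h | h
      · simp [h, ne_of_lt h, not_lt_of_gt h]
      · simp [h, compare_meta_eq_loop ra rb]
      · simp [ne_of_gt h, h, not_lt_of_gt h]
    · -- both ints
      rename_i x y
      rcases lt_trichotomy x y with h | h | h
      · simp [h, ne_of_lt h, not_lt_of_gt h]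
      · simp [h, compare_meta_eq_loop ra rb]
      · simp [ne_of_gt h, h, not_lt_of_gt h]

-- ===== VERDICT (by name: the statement is the Claim_ definition above) =====
theorem compare_meta_spec : Claim_equal_compare_meta := by
  intro set_a set_b _
  unfold Spec_compare_meta compare_meta_alt
  exact compare_meta_eq_loop set_a set_b
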